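-- pv_equiv track=rewrite | github.com/duzhch/Bio-Series | scripts/compare_ablations.py | build_summary_header
-- ===== SOURCE A (Python) =====
-- def build_summary_header(ablations):
--     return (
--         ["dataset_trait", "N_full_reps"]
--         + [f"N_{ablation}_reps" for ablation in ablations if ablation != "full"]
--         + [
--             f"N_paired_full_vs_{ablation}_reps"
--             for ablation in ablations
--             if ablation != "full"
--         ]
--         + [
--             column
--             for ablation in ablations
--             for column in (f"PCC_{ablation}_mean", f"PCC_{ablation}_std")
--         ]
--         + [f"mean_Delta_full_minus_{ablation}" for ablation in ablations if ablation != "full"]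
--         + [
--             column
--             for ablation in ablations
--             for column in (f"MSE_{ablation}_mean", f"MSE_{ablation}_std")
--         ]
--     )
-- ===== SOURCE B (Python) =====
-- def _row(a):
--     keep = a != "full"
--     return (
--         [f"N_{a}_reps"] if keep else [],
--         [f"N_paired_full_vs_{a}_reps"] if keep else [],
--         [f"PCC_{a}_mean", f"PCC_{a}_std"],
--         [f"mean_Delta_full_minus_{a}"] if keep else [],
--         [f"MSE_{a}_mean", f"MSE_{a}_std"],
--     )
--
-- def build_summary_header(ablations):
--     # build the per-ablation record matrix once (row-major), then emit it
--     # column-major (a transpose-style read), one section per column index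
--     rows = [_row(a) for a in ablations]
--     out = ["dataset_trait", "N_full_reps"]
--     for i in range(5):
--         for r in rows:
--             out.extend(r[i])
--     return out
-- ===== Notes on version B (the rewrite author's own statement) =====
-- stated objective: alternative
-- what changed: Builds a per-ablation record (a 5-tuple of section buckets) once, row-major, then produces the header by a transpose-style column-major read of that matrix, instead of A's six independent comprehension scans of the input list.
import Mathlib
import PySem

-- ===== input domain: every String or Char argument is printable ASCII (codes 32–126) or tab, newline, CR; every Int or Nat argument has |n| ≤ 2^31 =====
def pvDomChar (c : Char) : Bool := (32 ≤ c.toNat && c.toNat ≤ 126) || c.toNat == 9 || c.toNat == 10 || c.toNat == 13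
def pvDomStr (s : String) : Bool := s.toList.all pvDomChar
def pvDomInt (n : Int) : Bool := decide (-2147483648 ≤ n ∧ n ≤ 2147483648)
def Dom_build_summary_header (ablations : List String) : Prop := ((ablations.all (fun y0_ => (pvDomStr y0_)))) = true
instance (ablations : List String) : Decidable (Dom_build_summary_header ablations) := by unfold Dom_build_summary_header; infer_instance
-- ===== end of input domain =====

-- B builds a per-ablation 5-bucket record matrix once and emits it by a
-- transpose-style column-major read (alternative decomposition, same cost).


-- ===== PORT A =====
def build_summary_header (ablations : List String) : List String :=
  ["dataset_trait", "N_full_reps"]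
  ++ (ablations.filter (fun a => a ≠ "full")).map (fun a => "N_" ++ a ++ "_reps")
  ++ (ablations.filter (fun a => a ≠ "full")).map (fun a => "N_paired_full_vs_" ++ a ++ "_reps")
  ++ ablations.flatMap (fun a => ["PCC_" ++ a ++ "_mean", "PCC_" ++ a ++ "_std"])
  ++ (ablations.filter (fun a => a ≠ "full")).map (fun a => "mean_Delta_full_minus_" ++ a)
  ++ ablations.flatMap (fun a => ["MSE_" ++ a ++ "_mean", "MSE_" ++ a ++ "_std"])

-- ===== PORT B =====
-- _row of Source B: the Python 5-tuple of homogeneous buckets is ported as a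
-- 5-element list of buckets (r[i] below is the tuple indexing, always in range)
def bshRow (a : String) : List (List String) :=
  let keep := a ≠ "full"
  [ if keep then ["N_" ++ a ++ "_reps"] else [],
    if keep then ["N_paired_full_vs_" ++ a ++ "_reps"] else [],
    ["PCC_" ++ a ++ "_mean", "PCC_" ++ a ++ "_std"],
    if keep then ["mean_Delta_full_minus_" ++ a] else [],
    ["MSE_" ++ a ++ "_mean", "MSE_" ++ a ++ "_std"] ]

def build_summary_header_alt (ablations : List String) : List String :=
  let rows := ablations.map bshRow
  (List.range 5).foldl
    (fun out i => rows.foldl (fun o r => o ++ r.getD i []) out)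
    ["dataset_trait", "N_full_reps"]

-- ===== PRECONDITION & SPEC =====
def Spec_build_summary_header (ablations : List String) (out : List String) : Prop := out = build_summary_header_alt ablations
instance (ablations : List String) (out : List String) : Decidable (Spec_build_summary_header ablations out) := by unfold Spec_build_summary_header; infer_instance

-- ===== CLAIM =====
def Claim_equal_build_summary_header : Prop := ∀ (ablations : List String), Dom_build_summary_header ablations → Spec_build_summary_header ablations (build_summary_header ablations)

-- ===== LEMMAS AND PROOFS =====
theorem bshCol (ablations : List String) (i : Nat) (g : String → List String)
    (h : ∀ a, (bshRow a).getD i [] = g a) :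
    (ablations.map bshRow).flatMap (fun r => r.getD i []) = ablations.flatMap g := by
  induction ablations with
  | nil => simp
  | cons a rest ih =>
    simp only [List.map_cons, List.flatMap_cons, ih, h]

theorem bshFilt (l : List String) (f : String → String) :
    l.flatMap (fun a => if a ≠ "full" then [f a] else []) =
      (l.filter (fun a => a ≠ "full")).map f := by
  induction l with
  | nil => simp
  | cons a rest ih => by_cases h : a = "full" <;> simp [h] at ih ⊢ <;> simp [ih]

theorem build_summary_header_spec : Claim_equal_build_summary_header := by
  intro ablations _
  unfold Spec_build_summary_header build_summary_header build_summary_header_alt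
  have hr : List.range 5 = [0, 1, 2, 3, 4] := rfl
  rw [hr]
  simp only [List.foldl_cons, List.foldl_nil, PySem.List.foldl_append_eq_flatMap]
  rw [bshCol ablations 0 (fun a => if a ≠ "full" then ["N_" ++ a ++ "_reps"] else []) (by intro a; simp [bshRow]),
      bshCol ablations 1 (fun a => if a ≠ "full" then ["N_paired_full_vs_" ++ a ++ "_reps"] else []) (by intro a; simp [bshRow]),
      bshCol ablations 2 (fun a => ["PCC_" ++ a ++ "_mean", "PCC_" ++ a ++ "_std"]) (by intro a; simp [bshRow]),
      bshCol ablations 3 (fun a => if a ≠ "full" then ["mean_Delta_full_minus_" ++ a] else []) (by intro a; simp [bshRow]),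
      bshCol ablations 4 (fun a => ["MSE_" ++ a ++ "_mean", "MSE_" ++ a ++ "_std"]) (by intro a; simp [bshRow])]
  rw [bshFilt ablations (fun a => "N_" ++ a ++ "_reps"),
      bshFilt ablations (fun a => "N_paired_full_vs_" ++ a ++ "_reps"),
      bshFilt ablations (fun a => "mean_Delta_full_minus_" ++ a)]
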